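-- pv_equiv track=rewrite | github.com/akio7624/YomeiriTools | old_scripts/pack_apk.py | get_file_seg_size
-- ===== SOURCE A (Python) =====
-- def get_file_seg_size(size: int) -> int:
--     if size % 512 == 0:
--         return size
--     n = int(size / 512)
--     while True:
--         block_size = (n * 512 - 1)
--         if size <= block_size:
--             return block_size
--         n += 1
-- ===== SOURCE B (Python) =====
-- def get_file_seg_size(size: int) -> int:
--     if size % 512 == 0:
--         return size
--     return 512 * (size // 512 + 1) - 1
-- ===== Notes on version B (the rewrite author's own statement) =====
-- stated objective: simpler
-- what changed: Replaces the while-loop search (starting from a truncating division) with a closed-form floor-division computation of the next block boundary minus one.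
import Mathlib
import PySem

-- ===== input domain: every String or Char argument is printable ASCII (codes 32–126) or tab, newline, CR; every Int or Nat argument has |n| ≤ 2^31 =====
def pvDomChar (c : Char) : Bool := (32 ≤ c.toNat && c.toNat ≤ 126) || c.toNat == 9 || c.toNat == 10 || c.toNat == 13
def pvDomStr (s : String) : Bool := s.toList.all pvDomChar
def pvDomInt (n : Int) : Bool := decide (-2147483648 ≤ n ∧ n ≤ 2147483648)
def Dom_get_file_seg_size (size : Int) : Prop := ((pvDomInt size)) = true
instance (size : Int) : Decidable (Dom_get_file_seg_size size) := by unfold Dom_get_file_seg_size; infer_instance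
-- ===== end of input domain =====

-- B replaces A's while-loop search with a closed-form floor-division formula (objective: simpler).

-- ===== PORT A =====
-- the while-True loop: block_size = n*512 - 1; return it once size ≤ block_size, else n += 1
def pvLoopA (size n : Int) : Int :=
  if size ≤ n * 512 - 1 then n * 512 - 1
  else pvLoopA size (n + 1)
termination_by (size - (n * 512 - 1)).toNat
decreasing_by omega

def get_file_seg_size (size : Int) : Int :=
  if PySem.Int.mod size 512 = 0 then size
  else
    -- int(size / 512): true division then int() truncates toward zero; exact on Dom
    -- (|size| ≤ 2^31, and /512 is exact in a double), so it equals Int.tdiv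
    pvLoopA size (Int.tdiv size 512)

-- ===== PORT B =====
def get_file_seg_size_alt (size : Int) : Int :=
  if PySem.Int.mod size 512 = 0 then size
  else 512 * (PySem.Int.floordiv size 512 + 1) - 1

-- ===== PRECONDITION & SPEC =====
def Spec_get_file_seg_size (size : Int) (out : Int) : Prop := out = get_file_seg_size_alt size
instance (size : Int) (out : Int) : Decidable (Spec_get_file_seg_size size out) := by unfold Spec_get_file_seg_size; infer_instance

-- ===== CLAIM (what is proved, stated in full; the proofs are below) =====
def Claim_equal_get_file_seg_size : Prop := ∀ (size : Int), Dom_get_file_seg_size size → Spec_get_file_seg_size size (get_file_seg_size size)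

-- ===== LEMMAS AND PROOFS =====

theorem pvLoopA_eq (size n : Int) (h : size ≤ n * 512 - 1) : pvLoopA size n = n * 512 - 1 := by
  unfold pvLoopA; rw [if_pos h]

theorem pvLoopA_step (size n : Int) (h : ¬ size ≤ n * 512 - 1) :
    pvLoopA size n = pvLoopA size (n + 1) := by
  conv_lhs => unfold pvLoopA
  rw [if_neg h]

-- ===== VERDICT (by name: the statement is the Claim_ definition above) =====
theorem get_file_seg_size_spec : Claim_equal_get_file_seg_size := by
  intro size _
  unfold Spec_get_file_seg_size get_file_seg_size get_file_seg_size_alt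
  by_cases hm : PySem.Int.mod size 512 = 0
  · rw [if_pos hm, if_pos hm]
  · rw [if_neg hm, if_neg hm]
    have hfd := PySem.Int.floordiv_mul_add_mod size 512
    have hmb : 0 ≤ PySem.Int.mod size 512 ∧ PySem.Int.mod size 512 < 512 := by
      constructor
      · have := PySem.Int.mod_eq_emod_of_pos (a := size) (b := 512) (by norm_num)
        rw [this]; exact Int.emod_nonneg _ (by norm_num)
      · have := PySem.Int.mod_eq_emod_of_pos (a := size) (b := 512) (by norm_num)
        rw [this]; exact Int.emod_lt_of_pos _ (by norm_num)
    have htd := Int.mul_tdiv_add_tmod size 512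
    set q := PySem.Int.floordiv size 512 with hq
    set t := Int.tdiv size 512 with ht
    by_cases hpos : 0 ≤ size
    · -- trunc = floor here; loop runs one extra step
      have htm : 0 ≤ Int.tmod size 512 ∧ Int.tmod size 512 < 512 := by
        rw [Int.tmod_eq_emod_of_nonneg hpos]
        omega
      have hte : t = q := by omega
      rw [hte]
      rw [pvLoopA_step size q (by omega), pvLoopA_eq size (q + 1) (by omega)]
      ring
    · -- size < 0, not a multiple of 512: trunc = floor + 1; loop returns at once
      have htm : Int.tmod size 512 ≤ 0 ∧ -512 < Int.tmod size 512 := by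
        have h1 : Int.tmod (-size) 512 = - Int.tmod size 512 := Int.neg_tmod size 512
        have h2 : Int.tmod (-size) 512 = (-size) % 512 := Int.tmod_eq_emod_of_nonneg (by omega)
        omega
      have hte : t = q + 1 := by omega
      rw [hte, pvLoopA_eq size (q + 1) (by omega)]
      ring
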